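-- pv_equiv track=rewrite | github.com/GPLAN-team/Rule_Based_Paper | source/separatingtriangle/septri.py | filter_F
-- ===== SOURCE A (Python) =====
-- def filter_F(room_x, room_y, room_width, room_height, mergednodes, parents):
--     relevant_parents = [parent for parent in parents if parents.count(parent) == 2]
--     for parent in relevant_parents:
--         child_indices = [index for index, parent_elem in enumerate(parents) if parent_elem == parent]
--         child1 = mergednodes[child_indices[0]]
--         child2 = mergednodes[child_indices[1]]
--
--         x_s = [room_x[parent], room_x[parent] + room_width[parent], room_x[child1], room_x[child1] + room_width[child1], room_x[child2], room_x[child2] + room_width[child2]]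
--         y_s = [room_y[parent], room_y[parent] + room_height[parent], room_y[child1], room_y[child1] + room_height[child1], room_y[child2], room_y[child2] + room_height[child2]]
--         x = list(set(x_s))
--         y = list(set(y_s))
--         x_counts = tuple([x_s.count(value) for value in sorted(x)])
--         y_counts = tuple([y_s.count(value) for value in sorted(y)])
--
--         valid_combinations = set([((2,1,1,1,1), (1,3,2)), ((2,1,1,1,1), (1,3,1,1)), ((1,2,1,1,1), (2,2,2)), ((1,2,1,1,1), (2,2,1,1))])
--         if((x_counts, y_counts) in valid_combinations or (x_counts[::-1], y_counts) in valid_combinations or (x_counts, y_counts[::-1]) in valid_combinations or (x_counts[::-1], y_counts[::-1]) in valid_combinations):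
--             return True
--     return False
-- ===== SOURCE B (Python) =====
-- def _case(vals):
--     """Classify the 6 coordinate values by their duplicate structure, without
--     sorting: 'A' when the multiplicity pattern over the increasing distinct
--     values is (2,1,1,1,1) or its reverse, 'B' for (1,2,1,1,1) or its reverse,
--     None otherwise.  The single duplicated value is found arithmetically and
--     located by its rank (number of smaller distinct values)."""
--     distinct = set(vals)
--     if len(distinct) != 5:
--         return None
--     d = sum(vals) - sum(distinct)          # the one duplicated value
--     r = sum(1 for u in distinct if u < d)  # its rank among the distinct values
--     if r == 0 or r == 4:
--         return 'A'
--     if r == 1 or r == 3: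
--         return 'B'
--     return None
--
--
-- def _y_ok(vals, case):
--     distinct = set(vals)
--     if case == 'A':
--         # patterns (1,3,2),(2,3,1),(1,3,1,1),(1,1,3,1): some value occurring
--         # three times that is neither the smallest nor the largest
--         return any(vals.count(v) == 3
--                    and any(u < v for u in distinct)
--                    and any(v < u for u in distinct)
--                    for v in distinct)
--     # case 'B': patterns (2,2,2),(2,2,1,1),(1,1,2,2): the two lowest-ranked
--     # distinct values are both doubled, or the two highest-ranked are
--     twice_low = [v for v in distinct
--                  if vals.count(v) == 2 and sum(1 for u in distinct if u < v) <= 1]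
--     twice_high = [v for v in distinct
--                   if vals.count(v) == 2 and sum(1 for u in distinct if v < u) <= 1]
--     return len(twice_low) == 2 or len(twice_high) == 2
--
--
-- def filter_F(room_x, room_y, room_width, room_height, mergednodes, parents):
--     # one pass: group the occurrence indices of each parent value
--     groups = {}
--     for index, parent in enumerate(parents):
--         if parent in groups:
--             groups[parent].append(index)
--         else:
--             groups[parent] = [index]
--     for parent, idxs in groups.items():
--         if len(idxs) != 2:
--             continue
--         child1 = mergednodes[idxs[0]]
--         child2 = mergednodes[idxs[1]]
--         x_s = [room_x[parent], room_x[parent] + room_width[parent],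
--                room_x[child1], room_x[child1] + room_width[child1],
--                room_x[child2], room_x[child2] + room_width[child2]]
--         y_s = [room_y[parent], room_y[parent] + room_height[parent],
--                room_y[child1], room_y[child1] + room_height[child1],
--                room_y[child2], room_y[child2] + room_height[child2]]
--         case = _case(x_s)
--         if case is not None and _y_ok(y_s, case):
--             return True
--     return False
-- ===== Notes on version B (the rewrite author's own statement) =====
-- stated objective: faster
-- what changed: Replaces both of A's mechanisms: the O(n^2) relevant-parent search (count inside a comprehension plus a full enumerate scan per parent) becomes one dict-grouping pass, and the per-candidate test no longer sorts the coordinate values and matches count-signature tuples against a reversal-closed pattern set - instead it identifies the single duplicated x-value arithmetically (sum(vals)-sum(set)), classifies it by its rank among the distinct values, and checks the y-values by rank/extremum conditions (a non-extreme triple, or the two lowest/highest distinct values both doubled), with a proof that …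
import Mathlib
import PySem

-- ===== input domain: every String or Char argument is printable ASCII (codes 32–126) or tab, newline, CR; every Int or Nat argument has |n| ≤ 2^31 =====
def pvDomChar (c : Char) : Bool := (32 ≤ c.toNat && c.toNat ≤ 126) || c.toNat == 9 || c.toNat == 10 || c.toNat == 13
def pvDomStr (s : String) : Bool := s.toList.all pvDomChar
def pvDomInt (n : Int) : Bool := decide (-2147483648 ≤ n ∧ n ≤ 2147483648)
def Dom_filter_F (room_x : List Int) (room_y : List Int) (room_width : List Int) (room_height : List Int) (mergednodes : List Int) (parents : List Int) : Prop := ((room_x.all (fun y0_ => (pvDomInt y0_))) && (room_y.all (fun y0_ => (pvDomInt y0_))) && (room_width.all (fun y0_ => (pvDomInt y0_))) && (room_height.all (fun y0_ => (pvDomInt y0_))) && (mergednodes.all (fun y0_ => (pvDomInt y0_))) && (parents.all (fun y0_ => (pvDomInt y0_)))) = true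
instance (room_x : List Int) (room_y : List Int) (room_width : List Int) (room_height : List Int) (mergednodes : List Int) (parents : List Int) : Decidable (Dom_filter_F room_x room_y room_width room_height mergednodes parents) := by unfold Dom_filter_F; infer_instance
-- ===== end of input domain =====

-- B replaces A's O(n^2) relevant-parent search by one dict-grouping pass and replaces the
-- sort-and-match count-signature test by an arithmetic/rank classification of the duplicated
-- values; objective: faster (asymptotic).

-- ===== PORT A =====
def pvValidCombinations : PySem.Set (List Int × List Int) :=
  PySem.Set.ofList [([2,1,1,1,1],[1,3,2]), ([2,1,1,1,1],[1,3,1,1]),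
                    ([1,2,1,1,1],[2,2,2]), ([1,2,1,1,1],[2,2,1,1])]

-- the body of A's `for parent in relevant_parents` loop
def pvBodyA (room_x room_y room_width room_height mergednodes parents : List Int) (parent : Int) : Bool :=
  let child_indices := ((PySem.List.enumerate parents 0).filter (fun ip => ip.2 == parent)).map (fun ip => ip.1)
  let child1 := PySem.List.pyGetD mergednodes (PySem.List.pyGetD child_indices 0 0) 0
  let child2 := PySem.List.pyGetD mergednodes (PySem.List.pyGetD child_indices 1 0) 0
  let x_s : List Int := [PySem.List.pyGetD room_x parent 0,
    PySem.List.pyGetD room_x parent 0 + PySem.List.pyGetD room_width parent 0,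
    PySem.List.pyGetD room_x child1 0,
    PySem.List.pyGetD room_x child1 0 + PySem.List.pyGetD room_width child1 0,
    PySem.List.pyGetD room_x child2 0,
    PySem.List.pyGetD room_x child2 0 + PySem.List.pyGetD room_width child2 0]
  let y_s : List Int := [PySem.List.pyGetD room_y parent 0,
    PySem.List.pyGetD room_y parent 0 + PySem.List.pyGetD room_height parent 0,
    PySem.List.pyGetD room_y child1 0,
    PySem.List.pyGetD room_y child1 0 + PySem.List.pyGetD room_height child1 0,
    PySem.List.pyGetD room_y child2 0,
    PySem.List.pyGetD room_y child2 0 + PySem.List.pyGetD room_height child2 0]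
  let x := PySem.Set.ofList x_s
  let y := PySem.Set.ofList y_s
  let x_counts := (PySem.List.sorted x (fun v => v) false).map (fun v => (PySem.List.count x_s v : Int))
  let y_counts := (PySem.List.sorted y (fun v => v) false).map (fun v => (PySem.List.count y_s v : Int))
  PySem.Set.contains pvValidCombinations (x_counts, y_counts) ||
  PySem.Set.contains pvValidCombinations ((PySem.List.slice? x_counts none none (-1)).getD [], y_counts) ||
  PySem.Set.contains pvValidCombinations (x_counts, (PySem.List.slice? y_counts none none (-1)).getD []) ||
  PySem.Set.contains pvValidCombinations ((PySem.List.slice? x_counts none none (-1)).getD [], (PySem.List.slice? y_counts none none (-1)).getD [])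

-- A's loop with early `return True`
def pvLoopA (room_x room_y room_width room_height mergednodes parents : List Int) : List Int → Bool
  | [] => false
  | parent :: rest =>
      if pvBodyA room_x room_y room_width room_height mergednodes parents parent then true
      else pvLoopA room_x room_y room_width room_height mergednodes parents rest

def filter_F (room_x : List Int) (room_y : List Int) (room_width : List Int) (room_height : List Int) (mergednodes : List Int) (parents : List Int) : Bool :=
  let relevant_parents := parents.filter (fun p => PySem.List.count parents p == 2)
  pvLoopA room_x room_y room_width room_height mergednodes parents relevant_parents

-- ===== PORT B =====
-- Source B `_case`: classify the 6 values without sorting, by the rank of the duplicated value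
def pvCase (vals : List Int) : Option String :=
  let distinct := PySem.Set.ofList vals
  if distinct.length ≠ 5 then none
  else
    let d := vals.sum - distinct.sum
    let r := distinct.countP (fun u => decide (u < d))
    if r = 0 ∨ r = 4 then some "A"
    else if r = 1 ∨ r = 3 then some "B"
    else none

-- Source B `_y_ok`
def pvYOk (vals : List Int) (case : String) : Bool :=
  let distinct := PySem.Set.ofList vals
  if case == "A" then
    distinct.any (fun v => PySem.List.count vals v == 3
      && distinct.any (fun u => decide (u < v)) && distinct.any (fun u => decide (v < u)))
  else
    let twice_low := distinct.filter (fun v => PySem.List.count vals v == 2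
      && decide (distinct.countP (fun u => decide (u < v)) ≤ 1))
    let twice_high := distinct.filter (fun v => PySem.List.count vals v == 2
      && decide (distinct.countP (fun u => decide (v < u)) ≤ 1))
    twice_low.length == 2 || twice_high.length == 2

def pvBodyB (room_x room_y room_width room_height mergednodes : List Int) (parent : Int) (idxs : List Int) : Bool :=
  let child1 := PySem.List.pyGetD mergednodes (PySem.List.pyGetD idxs 0 0) 0
  let child2 := PySem.List.pyGetD mergednodes (PySem.List.pyGetD idxs 1 0) 0
  let x_s : List Int := [PySem.List.pyGetD room_x parent 0,
    PySem.List.pyGetD room_x parent 0 + PySem.List.pyGetD room_width parent 0,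
    PySem.List.pyGetD room_x child1 0,
    PySem.List.pyGetD room_x child1 0 + PySem.List.pyGetD room_width child1 0,
    PySem.List.pyGetD room_x child2 0,
    PySem.List.pyGetD room_x child2 0 + PySem.List.pyGetD room_width child2 0]
  let y_s : List Int := [PySem.List.pyGetD room_y parent 0,
    PySem.List.pyGetD room_y parent 0 + PySem.List.pyGetD room_height parent 0,
    PySem.List.pyGetD room_y child1 0,
    PySem.List.pyGetD room_y child1 0 + PySem.List.pyGetD room_height child1 0,
    PySem.List.pyGetD room_y child2 0,
    PySem.List.pyGetD room_y child2 0 + PySem.List.pyGetD room_height child2 0]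
  match pvCase x_s with
  | none => false
  | some c => pvYOk y_s c

-- B's loop over groups.items() (skip when len(idxs) != 2)
def pvLoopB (room_x room_y room_width room_height mergednodes : List Int) : List (Int × List Int) → Bool
  | [] => false
  | (parent, idxs) :: rest =>
      if idxs.length == 2 then
        if pvBodyB room_x room_y room_width room_height mergednodes parent idxs then true
        else pvLoopB room_x room_y room_width room_height mergednodes rest
      else pvLoopB room_x room_y room_width room_height mergednodes rest

def filter_F_alt (room_x : List Int) (room_y : List Int) (room_width : List Int) (room_height : List Int) (mergednodes : List Int) (parents : List Int) : Bool :=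
  -- `groups[parent].append(index)` / `groups[parent] = [index]` is exactly d[k] = d.get(k, []) + [index], i.e. Dict.modify
  let groups : PySem.Dict Int (List Int) :=
    (PySem.List.enumerate parents 0).foldl (fun d ip => d.modify ip.2 [] (fun l => l ++ [ip.1])) PySem.Dict.empty
  pvLoopB room_x room_y room_width room_height mergednodes groups.items

-- ===== PRECONDITION & SPEC =====
-- Pre_ excludes exactly the inputs where A raises IndexError: some occurrence of a parent value
-- appearing exactly twice is not a valid index into mergednodes, or that parent value or one of its
-- two merged children is out of Python's index range for the four room lists.
def Pre_filter_F (room_x : List Int) (room_y : List Int) (room_width : List Int) (room_height : List Int) (mergednodes : List Int) (parents : List Int) : Prop :=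
  ∀ ip ∈ PySem.List.enumerate parents 0, parents.count ip.2 = 2 →
    PySem.Raise.InRange mergednodes.length ip.1 ∧
    PySem.Raise.InRange room_x.length ip.2 ∧ PySem.Raise.InRange room_y.length ip.2 ∧
    PySem.Raise.InRange room_width.length ip.2 ∧ PySem.Raise.InRange room_height.length ip.2 ∧
    PySem.Raise.InRange room_x.length (PySem.List.pyGetD mergednodes ip.1 0) ∧
    PySem.Raise.InRange room_y.length (PySem.List.pyGetD mergednodes ip.1 0) ∧
    PySem.Raise.InRange room_width.length (PySem.List.pyGetD mergednodes ip.1 0) ∧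
    PySem.Raise.InRange room_height.length (PySem.List.pyGetD mergednodes ip.1 0)

instance (room_x : List Int) (room_y : List Int) (room_width : List Int) (room_height : List Int) (mergednodes : List Int) (parents : List Int) : Decidable (Pre_filter_F room_x room_y room_width room_height mergednodes parents) := by unfold Pre_filter_F; infer_instance

def pvWitness_filter_F : List Int × List Int × List Int × List Int × List Int × List Int :=
  ([0,0,0], [0,0,0], [1,1,1], [1,1,1], [1,2], [0,0])

def Spec_filter_F (room_x : List Int) (room_y : List Int) (room_width : List Int) (room_height : List Int) (mergednodes : List Int) (parents : List Int) (out : Bool) : Prop := out = filter_F_alt room_x room_y room_width room_height mergednodes parents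
instance (room_x : List Int) (room_y : List Int) (room_width : List Int) (room_height : List Int) (mergednodes : List Int) (parents : List Int) (out : Bool) : Decidable (Spec_filter_F room_x room_y room_width room_height mergednodes parents out) := by unfold Spec_filter_F; infer_instance

-- ===== CLAIM (what is proved, stated in full; the proofs are below) =====
def Claim_equal_filter_F : Prop := ∀ (room_x : List Int) (room_y : List Int) (room_width : List Int) (room_height : List Int) (mergednodes : List Int) (parents : List Int), Dom_filter_F room_x room_y room_width room_height mergednodes parents → Pre_filter_F room_x room_y room_width room_height mergednodes parents → Spec_filter_F room_x room_y room_width room_height mergednodes parents (filter_F room_x room_y room_width room_height mergednodes parents)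

-- ===== LEMMAS AND PROOFS =====

-- occurrence positions of p in ps (what A calls child_indices and B stores in groups[p])
def pvPos (parents : List Int) (p : Int) : List Int :=
  ((PySem.List.enumerate parents 0).filter (fun ip => ip.2 == p)).map (fun ip => ip.1)

-- the strictly increasing list of distinct values, and A's count signature over it
def sdist (L : List Int) : List Int :=
  PySem.List.sorted (PySem.Set.ofList L) (fun v => v) false
def cnts (L : List Int) : List Int :=
  (sdist L).map (fun v => (PySem.List.count L v : Int))

theorem sdist_perm (L : List Int) : (sdist L).Perm (PySem.Set.ofList L) :=
  PySem.List.sorted_perm _ _ _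

theorem sdist_lt (L : List Int) : (sdist L).Pairwise (· < ·) :=
  PySem.List.sorted_ofList_pairwise_lt L

theorem mem_sdist (L : List Int) (v : Int) : v ∈ sdist L ↔ v ∈ L := by
  rw [(sdist_perm L).mem_iff, PySem.Set.mem_ofList]

-- Σ_{v ∈ s} count_L(v) · f(v) = Σ_{u ∈ L} f(u) whenever s is duplicate-free and covers L
theorem weighted_count_sum (f : Int → Int) :
    ∀ (s L : List Int), s.Nodup → (∀ u ∈ L, u ∈ s) →
      (s.map (fun v => (L.count v : Int) * f v)).sum = (L.map f).sum := by
  intro s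
  induction s with
  | nil =>
      intro L _ hcov
      have : L = [] := by
        cases L with
        | nil => rfl
        | cons a t => exact absurd (hcov a (by simp)) (by simp)
      simp [this]
  | cons v t ih =>
      intro L hnd hcov
      have hndt : t.Nodup := (List.nodup_cons.mp hnd).2
      have hvt : v ∉ t := (List.nodup_cons.mp hnd).1
      have hperm : (L.filter (fun u => u == v) ++ L.filter (fun u => !(u == v))).Perm L :=
        List.filter_append_perm _ L
      have hfeq : L.filter (fun u => u == v) = List.replicate (L.count v) v := by
        simp [List.count, List.filter_beq]
      have hcount : ∀ u ∈ t, (L.filter (fun u => !(u == v))).count u = L.count u := by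
        intro u hu
        have : u ≠ v := fun h => hvt (h ▸ hu)
        rw [List.count_filter]
        simp [this]
      have hcov' : ∀ u ∈ L.filter (fun u => !(u == v)), u ∈ t := by
        intro u hu
        rcases List.mem_filter.mp hu with ⟨huL, hne⟩
        simp only [Bool.not_eq_eq_eq_not, Bool.not_true, beq_eq_false_iff_ne, ne_eq] at hne
        rcases List.mem_cons.mp (hcov u huL) with h | h
        · exact absurd h hne
        · exact h
      have hsum : (L.map f).sum
          = (L.count v : Int) * f v + ((L.filter (fun u => !(u == v))).map f).sum := by
        have := (hperm.map f).sum_eq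
        rw [← this, List.map_append, List.sum_append, hfeq]
        simp [List.map_replicate, List.sum_replicate, mul_comm]
      rw [List.map_cons, List.sum_cons, hsum]
      have hmap : List.map (fun x => ((L.count x : Int)) * f x) t
          = List.map (fun x => (((L.filter (fun u => !(u == v))).count x : Int)) * f x) t :=
        List.map_congr_left (fun u hu => by rw [hcount u hu])
      rw [hmap, ih (L.filter (fun u => !(u == v))) hndt hcov']

-- rank: in a strictly increasing list, the number of elements below s[j] is j
theorem rank_countP :
    ∀ (s : List Int), s.Pairwise (· < ·) → ∀ (j : Nat) (hj : j < s.length),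
      s.countP (fun u => decide (u < s[j])) = j := by
  intro s
  induction s with
  | nil => intro _ j hj; simp at hj
  | cons a t ih =>
      intro hp j hj
      have hat : ∀ u ∈ t, a < u := fun u hu => (List.pairwise_cons.mp hp).1 u hu
      have hpt : t.Pairwise (· < ·) := (List.pairwise_cons.mp hp).2
      cases j with
      | zero =>
          simp only [List.getElem_cons_zero]
          rw [List.countP_eq_zero]
          intro u hu
          simp only [decide_eq_true_eq]
          rcases List.mem_cons.mp hu with h | h
          · exact h ▸ lt_irrefl a
          · exact not_lt.mpr (le_of_lt (hat u h))
      | succ j =>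
          have hjt : j < t.length := by simpa using hj
          have : (a :: t)[j + 1] = t[j] := by simp
          rw [this, List.countP_cons]
          have h2 : t.countP (fun u => decide (u < t[j])) = j := ih hpt j hjt
          have ha : a < t[j] := hat _ (List.getElem_mem hjt)
          simp [h2, ha]

-- every count over a distinct value is ≥ 1, and the counts sum to the length
theorem cnts_sum (L : List Int) : (cnts L).sum = (L.length : Int) := by
  have h := weighted_count_sum (fun _ => 1) (sdist L)
    L ((sdist_perm L).nodup_iff.mpr (PySem.Set.nodup_ofList L))
    (fun u hu => (mem_sdist L u).mpr hu)
  simpa [cnts, PySem.List.count_eq, PySem.List.sum_map_const_int] using h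

theorem sum_eq_weighted (L : List Int) :
    ((sdist L).map (fun v => (L.count v : Int) * v)).sum = L.sum := by
  have h := weighted_count_sum (fun v => v) (sdist L)
    L ((sdist_perm L).nodup_iff.mpr (PySem.Set.nodup_ofList L))
    (fun u hu => (mem_sdist L u).mpr hu)
  simpa using h

theorem count_pos_of_mem_sdist (L : List Int) (v : Int) (h : v ∈ sdist L) :
    1 ≤ (L.count v : Int) := by
  have := List.count_pos_iff.mpr ((mem_sdist L v).mp h)
  exact_mod_cast this


theorem patt (xc yc : List Int) :
    (PySem.Set.contains pvValidCombinations (xc, yc) ||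
     PySem.Set.contains pvValidCombinations (xc.reverse, yc) ||
     PySem.Set.contains pvValidCombinations (xc, yc.reverse) ||
     PySem.Set.contains pvValidCombinations (xc.reverse, yc.reverse)) = true ↔
    (((xc = [2,1,1,1,1] ∨ xc = [1,1,1,1,2]) ∧
      (yc = [1,3,2] ∨ yc = [2,3,1] ∨ yc = [1,3,1,1] ∨ yc = [1,1,3,1])) ∨
     ((xc = [1,2,1,1,1] ∨ xc = [1,1,1,2,1]) ∧
      (yc = [2,2,2] ∨ yc = [2,2,1,1] ∨ yc = [1,1,2,2]))) := by
  have hv : pvValidCombinations = [([2,1,1,1,1],[1,3,2]), ([2,1,1,1,1],[1,3,1,1]),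
                    ([1,2,1,1,1],[2,2,2]), ([1,2,1,1,1],[2,2,1,1])] := by decide
  rw [hv]
  simp only [PySem.Set.contains, Bool.or_eq_true, List.contains_eq_mem, decide_eq_true_eq,
    List.mem_cons, List.not_mem_nil, or_false, Prod.mk.injEq, List.reverse_eq_iff,
    List.reverse_cons, List.reverse_nil, List.nil_append, List.cons_append]
  constructor
  · rintro ((((⟨h1,h2⟩|⟨h1,h2⟩|⟨h1,h2⟩|⟨h1,h2⟩)|⟨h1,h2⟩|⟨h1,h2⟩|⟨h1,h2⟩|⟨h1,h2⟩)|
      ⟨h1,h2⟩|⟨h1,h2⟩|⟨h1,h2⟩|⟨h1,h2⟩)|⟨h1,h2⟩|⟨h1,h2⟩|⟨h1,h2⟩|⟨h1,h2⟩) <;>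
      subst h1 <;> subst h2 <;> decide
  · rintro (⟨(h1|h1),(h2|h2|h2|h2)⟩|⟨(h1|h1),(h2|h2|h2)⟩) <;>
      subst h1 <;> subst h2 <;> decide


theorem exists5 (l : List Int) (h : l.length = 5) : ∃ a b c e f, l = [a,b,c,e,f] := by
  rcases l with _|⟨a,_|⟨b,_|⟨c,_|⟨e,_|⟨f,_|⟨g,t⟩⟩⟩⟩⟩⟩ <;> simp at h
  exact ⟨a,b,c,e,f,rfl⟩

theorem xlem (L : List Int) (h6 : L.length = 6) :
    ((cnts L = [2,1,1,1,1] ∨ cnts L = [1,1,1,1,2]) ↔ pvCase L = some "A") ∧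
    ((cnts L = [1,2,1,1,1] ∨ cnts L = [1,1,1,2,1]) ↔ pvCase L = some "B") := by
  have hperm := sdist_perm L
  have hlt := sdist_lt L
  have hlen : (PySem.Set.ofList L).length = (sdist L).length := hperm.length_eq.symm
  by_cases hk : (PySem.Set.ofList L).length = 5
  · -- five distinct values
    obtain ⟨a,b,c,e,f,hsl⟩ := exists5 (sdist L) (by omega)
    rw [hsl] at hlt
    have hcnts : cnts L = [(L.count a : Int), (L.count b : Int), (L.count c : Int),
        (L.count e : Int), (L.count f : Int)] := by
      simp [cnts, hsl, PySem.List.count_eq]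
    have hsum : (L.count a : Int) + (L.count b : Int) + (L.count c : Int)
        + (L.count e : Int) + (L.count f : Int) = 6 := by
      have := cnts_sum L
      rw [hcnts] at this
      simp at this
      omega
    have hmem : ∀ v ∈ ([a,b,c,e,f] : List Int), 1 ≤ (L.count v : Int) := by
      intro v hv
      exact count_pos_of_mem_sdist L v (by rw [hsl]; exact hv)
    have h1a := hmem a (by simp); have h1b := hmem b (by simp); have h1c := hmem c (by simp)
    have h1e := hmem e (by simp); have h1f := hmem f (by simp)
    have hw := sum_eq_weighted L
    rw [hsl] at hw
    simp only [List.map_cons, List.map_nil, List.sum_cons, List.sum_nil, add_zero] at hw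
    have hssum : (PySem.Set.ofList L).sum = a + b + c + e + f := by
      rw [← hperm.sum_eq, hsl]
      simp only [List.sum_cons, List.sum_nil]
      ring
    have hrank : ∀ (j : Nat) (hj : j < 5),
        ([a,b,c,e,f] : List Int).countP (fun u => decide (u < ([a,b,c,e,f] : List Int)[j]'(by simpa using hj))) = j :=
      fun j hj => rank_countP [a,b,c,e,f] hlt j (by simpa using hj)
    have hcountP : ∀ d : Int, (PySem.Set.ofList L).countP (fun u => decide (u < d))
        = ([a,b,c,e,f] : List Int).countP (fun u => decide (u < d)) := by
      intro d
      rw [← (hperm.countP_eq _), hsl]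
    have hcase : ((L.count a : Int) = 2 ∧ (L.count b : Int) = 1 ∧ (L.count c : Int) = 1 ∧ (L.count e : Int) = 1 ∧ (L.count f : Int) = 1)
        ∨ ((L.count a : Int) = 1 ∧ (L.count b : Int) = 2 ∧ (L.count c : Int) = 1 ∧ (L.count e : Int) = 1 ∧ (L.count f : Int) = 1)
        ∨ ((L.count a : Int) = 1 ∧ (L.count b : Int) = 1 ∧ (L.count c : Int) = 2 ∧ (L.count e : Int) = 1 ∧ (L.count f : Int) = 1)
        ∨ ((L.count a : Int) = 1 ∧ (L.count b : Int) = 1 ∧ (L.count c : Int) = 1 ∧ (L.count e : Int) = 2 ∧ (L.count f : Int) = 1)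
        ∨ ((L.count a : Int) = 1 ∧ (L.count b : Int) = 1 ∧ (L.count c : Int) = 1 ∧ (L.count e : Int) = 1 ∧ (L.count f : Int) = 2) := by
      omega
    rcases hcase with ⟨ha,hb,hc,he,hf⟩|⟨ha,hb,hc,he,hf⟩|⟨ha,hb,hc,he,hf⟩|⟨ha,hb,hc,he,hf⟩|⟨ha,hb,hc,he,hf⟩ <;>
      rw [ha,hb,hc,he,hf] at hw <;> rw [hcnts, ha,hb,hc,he,hf]
    · have hd : L.sum - (PySem.Set.ofList L).sum = a := by rw [hssum]; omega
      have hr : (PySem.Set.ofList L).countP (fun u => decide (u < L.sum - (PySem.Set.ofList L).sum)) = 0 := by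
        simp only [hd, hcountP]; exact hrank 0 (by norm_num)
      have hpv : pvCase L = some "A" := by
        simp only [pvCase, hk, hr]
        norm_num
      rw [hpv]
      exact ⟨by simp, by simp⟩
    · have hd : L.sum - (PySem.Set.ofList L).sum = b := by rw [hssum]; omega
      have hr : (PySem.Set.ofList L).countP (fun u => decide (u < L.sum - (PySem.Set.ofList L).sum)) = 1 := by
        simp only [hd, hcountP]; exact hrank 1 (by norm_num)
      have hpv : pvCase L = some "B" := by
        simp only [pvCase, hk, hr]
        norm_num
      rw [hpv]
      exact ⟨by simp, by simp⟩
    · have hd : L.sum - (PySem.Set.ofList L).sum = c := by rw [hssum]; omega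
      have hr : (PySem.Set.ofList L).countP (fun u => decide (u < L.sum - (PySem.Set.ofList L).sum)) = 2 := by
        simp only [hd, hcountP]; exact hrank 2 (by norm_num)
      have hpv : pvCase L = none := by
        simp only [pvCase, hk, hr]
        norm_num
      rw [hpv]
      exact ⟨by simp, by simp⟩
    · have hd : L.sum - (PySem.Set.ofList L).sum = e := by rw [hssum]; omega
      have hr : (PySem.Set.ofList L).countP (fun u => decide (u < L.sum - (PySem.Set.ofList L).sum)) = 3 := by
        simp only [hd, hcountP]; exact hrank 3 (by norm_num)
      have hpv : pvCase L = some "B" := by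
        simp only [pvCase, hk, hr]
        norm_num
      rw [hpv]
      exact ⟨by simp, by simp⟩
    · have hd : L.sum - (PySem.Set.ofList L).sum = f := by rw [hssum]; omega
      have hr : (PySem.Set.ofList L).countP (fun u => decide (u < L.sum - (PySem.Set.ofList L).sum)) = 4 := by
        simp only [hd, hcountP]; exact hrank 4 (by norm_num)
      have hpv : pvCase L = some "A" := by
        simp only [pvCase, hk, hr]
        norm_num
      rw [hpv]
      exact ⟨by simp, by simp⟩
  · -- not five distinct values: both sides false
    have hclen : (cnts L).length ≠ 5 := by
      simp only [cnts, List.length_map]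
      omega
    have hpv : pvCase L = none := by
      simp only [pvCase]
      rw [if_pos hk]
    rw [hpv]
    constructor <;> constructor <;> intro hx
    · exfalso; rcases hx with hx|hx <;> rw [hx] at hclen <;> simp at hclen
    · exact absurd hx (by simp)
    · exfalso; rcases hx with hx|hx <;> rw [hx] at hclen <;> simp at hclen
    · exact absurd hx (by simp)


theorem ycharA (L : List Int) :
    (pvYOk L "A" = true) ↔ ∃ v ∈ sdist L, (L.count v = 3 ∧ ∃ u ∈ sdist L, u < v) ∧ (∃ u ∈ sdist L, v < u) := by
  have hm : ∀ v : Int, v ∈ PySem.Set.ofList L ↔ v ∈ sdist L :=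
    fun v => (PySem.Set.mem_ofList _ _).trans (mem_sdist L v).symm
  simp [pvYOk, PySem.List.count_eq, hm]

theorem ycharB (L : List Int) :
    (pvYOk L "B" = true) ↔
      ((sdist L).countP (fun v => L.count v == 2 &&
          decide ((sdist L).countP (fun u => decide (u < v)) ≤ 1)) = 2 ∨
       (sdist L).countP (fun v => L.count v == 2 &&
          decide ((sdist L).countP (fun u => decide (v < u)) ≤ 1)) = 2) := by
  have hperm := sdist_perm L
  have h1 : ∀ (v : Int), (PySem.Set.ofList L).countP (fun u => decide (u < v))
      = (sdist L).countP (fun u => decide (u < v)) := fun v => ((hperm.countP_eq _)).symm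
  have h2 : ∀ (v : Int), (PySem.Set.ofList L).countP (fun u => decide (v < u))
      = (sdist L).countP (fun u => decide (v < u)) := fun v => ((hperm.countP_eq _)).symm
  have hne : (("B" : String) == "A") = false := by decide
  simp only [pvYOk, hne, Bool.false_eq_true, if_false, Bool.or_eq_true, beq_iff_eq,
    ← List.countP_eq_length_filter, h1, h2, PySem.List.count_eq]
  rw [← hperm.countP_eq, ← hperm.countP_eq]

theorem existsN (l : List Int) :
    l = [] ∨ (∃ a, l = [a]) ∨ (∃ a b, l = [a,b]) ∨ (∃ a b c, l = [a,b,c]) ∨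
    (∃ a b c e, l = [a,b,c,e]) ∨ (∃ a b c e f, l = [a,b,c,e,f]) ∨
    (∃ a b c e f g, l = [a,b,c,e,f,g]) ∨ 7 ≤ l.length := by
  rcases l with _|⟨a,_|⟨b,_|⟨c,_|⟨e,_|⟨f,_|⟨g,_|⟨h,t⟩⟩⟩⟩⟩⟩⟩ <;> simp

theorem len_le_sum (l : List Int) (h : ∀ x ∈ l, 1 ≤ x) : (l.length : Int) ≤ l.sum := by
  induction l with
  | nil => simp
  | cons x t ih =>
      simp only [List.length_cons, List.sum_cons]
      have hx := h x (by simp)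
      have ht := ih (fun y hy => h y (List.mem_cons_of_mem _ hy))
      push_cast
      omega

theorem sdist_len_le (L : List Int) (h6 : L.length = 6) : (sdist L).length ≤ 6 := by
  have hs := cnts_sum L
  have hmem : ∀ x ∈ cnts L, 1 ≤ x := by
    intro x hx
    simp only [cnts, List.mem_map] at hx
    obtain ⟨v, hv, hxe⟩ := hx
    rw [← hxe]
    exact count_pos_of_mem_sdist L v hv
  have := len_le_sum (cnts L) hmem
  rw [hs, h6] at this
  have hl : (cnts L).length = (sdist L).length := by simp [cnts]
  omega

set_option maxHeartbeats 2000000 in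
theorem ylem (L : List Int) (h6 : L.length = 6) :
    ((cnts L = [1,3,2] ∨ cnts L = [2,3,1] ∨ cnts L = [1,3,1,1] ∨ cnts L = [1,1,3,1]) ↔ pvYOk L "A" = true) ∧
    ((cnts L = [2,2,2] ∨ cnts L = [2,2,1,1] ∨ cnts L = [1,1,2,2]) ↔ pvYOk L "B" = true) := by
  rw [ycharA, ycharB]
  have hle := sdist_len_le L h6
  rcases existsN (sdist L) with hsl | ⟨a,hsl⟩ | ⟨a,b,hsl⟩ | ⟨a,b,c,hsl⟩ | ⟨a,b,c,e,hsl⟩ |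
    ⟨a,b,c,e,f,hsl⟩ | ⟨a,b,c,e,f,g,hsl⟩ | h7
  · -- 0 distinct values
    rw [hsl]
    have hcnts : cnts L = [] := by simp [cnts, hsl]
    have h := cnts_sum L
    rw [hcnts, h6] at h
    simp at h
  · -- 1 distinct values
    rw [hsl]
    have hlt' := sdist_lt L
    rw [hsl] at hlt'
    have hcnts : cnts L = [(L.count a : Int)] := by simp [cnts, hsl, PySem.List.count_eq]
    have hsum : (L.count a : Int) = 6 := by
      have h := cnts_sum L
      rw [hcnts, h6] at h
      simp at h
      omega
    have h1a : 1 ≤ (L.count a : Int) := count_pos_of_mem_sdist L a (by rw [hsl]; simp)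
    have hd00 : (decide (a < a)) = false := by simp
    rw [hcnts]
    constructor
    · first
      | (simp [List.mem_cons]; omega)
      | simp [List.mem_cons]
    · simp only [List.countP_cons, List.countP_nil, hd00]
      by_cases hca : List.count a L = 2 <;>
        simp [hca] <;>
        omega
  · -- 2 distinct values
    rw [hsl]
    have hlt' := sdist_lt L
    rw [hsl] at hlt'
    have hcnts : cnts L = [(L.count a : Int), (L.count b : Int)] := by simp [cnts, hsl, PySem.List.count_eq]
    have hsum : (L.count a : Int) + (L.count b : Int) = 6 := by
      have h := cnts_sum L
      rw [hcnts, h6] at h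
      simp at h
      omega
    have h1a : 1 ≤ (L.count a : Int) := count_pos_of_mem_sdist L a (by rw [hsl]; simp)
    have h1b : 1 ≤ (L.count b : Int) := count_pos_of_mem_sdist L b (by rw [hsl]; simp)
    have ho01 : a < b := by simpa using List.pairwise_iff_get.mp hlt' ⟨0, by simp⟩ ⟨1, by simp⟩ (by simp)
    have hd00 : (decide (a < a)) = false := by simp
    have hd01 : (decide (a < b)) = true := by simp [ho01]
    have hd10 : (decide (b < a)) = false := by simp; omega
    have hd11 : (decide (b < b)) = false := by simp
    rw [hcnts]
    constructor
    · first
      | (simp [List.mem_cons]; omega)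
      | simp [List.mem_cons]
    · simp only [List.countP_cons, List.countP_nil, hd00, hd01, hd10, hd11]
      by_cases hca : List.count a L = 2 <;>
        by_cases hcb : List.count b L = 2 <;>
        simp [hca, hcb] <;>
        omega
  · -- 3 distinct values
    rw [hsl]
    have hlt' := sdist_lt L
    rw [hsl] at hlt'
    have hcnts : cnts L = [(L.count a : Int), (L.count b : Int), (L.count c : Int)] := by simp [cnts, hsl, PySem.List.count_eq]
    have hsum : (L.count a : Int) + (L.count b : Int) + (L.count c : Int) = 6 := by
      have h := cnts_sum L
      rw [hcnts, h6] at h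
      simp at h
      omega
    have h1a : 1 ≤ (L.count a : Int) := count_pos_of_mem_sdist L a (by rw [hsl]; simp)
    have h1b : 1 ≤ (L.count b : Int) := count_pos_of_mem_sdist L b (by rw [hsl]; simp)
    have h1c : 1 ≤ (L.count c : Int) := count_pos_of_mem_sdist L c (by rw [hsl]; simp)
    have ho01 : a < b := by simpa using List.pairwise_iff_get.mp hlt' ⟨0, by simp⟩ ⟨1, by simp⟩ (by simp)
    have ho02 : a < c := by simpa using List.pairwise_iff_get.mp hlt' ⟨0, by simp⟩ ⟨2, by simp⟩ (by simp)
    have ho12 : b < c := by simpa using List.pairwise_iff_get.mp hlt' ⟨1, by simp⟩ ⟨2, by simp⟩ (by simp)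
    have hd00 : (decide (a < a)) = false := by simp
    have hd01 : (decide (a < b)) = true := by simp [ho01]
    have hd02 : (decide (a < c)) = true := by simp [ho02]
    have hd10 : (decide (b < a)) = false := by simp; omega
    have hd11 : (decide (b < b)) = false := by simp
    have hd12 : (decide (b < c)) = true := by simp [ho12]
    have hd20 : (decide (c < a)) = false := by simp; omega
    have hd21 : (decide (c < b)) = false := by simp; omega
    have hd22 : (decide (c < c)) = false := by simp
    rw [hcnts]
    constructor
    · first
      | (simp [List.mem_cons]; omega)
      | simp [List.mem_cons]
    · simp only [List.countP_cons, List.countP_nil, hd00, hd01, hd02, hd10, hd11, hd12, hd20, hd21, hd22]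
      by_cases hca : List.count a L = 2 <;>
        by_cases hcb : List.count b L = 2 <;>
        by_cases hcc : List.count c L = 2 <;>
        simp [hca, hcb, hcc] <;>
        omega
  · -- 4 distinct values
    rw [hsl]
    have hlt' := sdist_lt L
    rw [hsl] at hlt'
    have hcnts : cnts L = [(L.count a : Int), (L.count b : Int), (L.count c : Int), (L.count e : Int)] := by simp [cnts, hsl, PySem.List.count_eq]
    have hsum : (L.count a : Int) + (L.count b : Int) + (L.count c : Int) + (L.count e : Int) = 6 := by
      have h := cnts_sum L
      rw [hcnts, h6] at h
      simp at h
      omega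
    have h1a : 1 ≤ (L.count a : Int) := count_pos_of_mem_sdist L a (by rw [hsl]; simp)
    have h1b : 1 ≤ (L.count b : Int) := count_pos_of_mem_sdist L b (by rw [hsl]; simp)
    have h1c : 1 ≤ (L.count c : Int) := count_pos_of_mem_sdist L c (by rw [hsl]; simp)
    have h1e : 1 ≤ (L.count e : Int) := count_pos_of_mem_sdist L e (by rw [hsl]; simp)
    have ho01 : a < b := by simpa using List.pairwise_iff_get.mp hlt' ⟨0, by simp⟩ ⟨1, by simp⟩ (by simp)
    have ho02 : a < c := by simpa using List.pairwise_iff_get.mp hlt' ⟨0, by simp⟩ ⟨2, by simp⟩ (by simp)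
    have ho03 : a < e := by simpa using List.pairwise_iff_get.mp hlt' ⟨0, by simp⟩ ⟨3, by simp⟩ (by simp)
    have ho12 : b < c := by simpa using List.pairwise_iff_get.mp hlt' ⟨1, by simp⟩ ⟨2, by simp⟩ (by simp)
    have ho13 : b < e := by simpa using List.pairwise_iff_get.mp hlt' ⟨1, by simp⟩ ⟨3, by simp⟩ (by simp)
    have ho23 : c < e := by simpa using List.pairwise_iff_get.mp hlt' ⟨2, by simp⟩ ⟨3, by simp⟩ (by simp)
    have hd00 : (decide (a < a)) = false := by simp
    have hd01 : (decide (a < b)) = true := by simp [ho01]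
    have hd02 : (decide (a < c)) = true := by simp [ho02]
    have hd03 : (decide (a < e)) = true := by simp [ho03]
    have hd10 : (decide (b < a)) = false := by simp; omega
    have hd11 : (decide (b < b)) = false := by simp
    have hd12 : (decide (b < c)) = true := by simp [ho12]
    have hd13 : (decide (b < e)) = true := by simp [ho13]
    have hd20 : (decide (c < a)) = false := by simp; omega
    have hd21 : (decide (c < b)) = false := by simp; omega
    have hd22 : (decide (c < c)) = false := by simp
    have hd23 : (decide (c < e)) = true := by simp [ho23]
    have hd30 : (decide (e < a)) = false := by simp; omega
    have hd31 : (decide (e < b)) = false := by simp; omega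
    have hd32 : (decide (e < c)) = false := by simp; omega
    have hd33 : (decide (e < e)) = false := by simp
    rw [hcnts]
    constructor
    · first
      | (simp [List.mem_cons]; omega)
      | simp [List.mem_cons]
    · simp only [List.countP_cons, List.countP_nil, hd00, hd01, hd02, hd03, hd10, hd11, hd12, hd13, hd20, hd21, hd22, hd23, hd30, hd31, hd32, hd33]
      by_cases hca : List.count a L = 2 <;>
        by_cases hcb : List.count b L = 2 <;>
        by_cases hcc : List.count c L = 2 <;>
        by_cases hce : List.count e L = 2 <;>
        simp [hca, hcb, hcc, hce] <;>
        omega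
  · -- 5 distinct values
    rw [hsl]
    have hlt' := sdist_lt L
    rw [hsl] at hlt'
    have hcnts : cnts L = [(L.count a : Int), (L.count b : Int), (L.count c : Int), (L.count e : Int), (L.count f : Int)] := by simp [cnts, hsl, PySem.List.count_eq]
    have hsum : (L.count a : Int) + (L.count b : Int) + (L.count c : Int) + (L.count e : Int) + (L.count f : Int) = 6 := by
      have h := cnts_sum L
      rw [hcnts, h6] at h
      simp at h
      omega
    have h1a : 1 ≤ (L.count a : Int) := count_pos_of_mem_sdist L a (by rw [hsl]; simp)
    have h1b : 1 ≤ (L.count b : Int) := count_pos_of_mem_sdist L b (by rw [hsl]; simp)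
    have h1c : 1 ≤ (L.count c : Int) := count_pos_of_mem_sdist L c (by rw [hsl]; simp)
    have h1e : 1 ≤ (L.count e : Int) := count_pos_of_mem_sdist L e (by rw [hsl]; simp)
    have h1f : 1 ≤ (L.count f : Int) := count_pos_of_mem_sdist L f (by rw [hsl]; simp)
    have ho01 : a < b := by simpa using List.pairwise_iff_get.mp hlt' ⟨0, by simp⟩ ⟨1, by simp⟩ (by simp)
    have ho02 : a < c := by simpa using List.pairwise_iff_get.mp hlt' ⟨0, by simp⟩ ⟨2, by simp⟩ (by simp)
    have ho03 : a < e := by simpa using List.pairwise_iff_get.mp hlt' ⟨0, by simp⟩ ⟨3, by simp⟩ (by simp)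
    have ho04 : a < f := by simpa using List.pairwise_iff_get.mp hlt' ⟨0, by simp⟩ ⟨4, by simp⟩ (by simp)
    have ho12 : b < c := by simpa using List.pairwise_iff_get.mp hlt' ⟨1, by simp⟩ ⟨2, by simp⟩ (by simp)
    have ho13 : b < e := by simpa using List.pairwise_iff_get.mp hlt' ⟨1, by simp⟩ ⟨3, by simp⟩ (by simp)
    have ho14 : b < f := by simpa using List.pairwise_iff_get.mp hlt' ⟨1, by simp⟩ ⟨4, by simp⟩ (by simp)
    have ho23 : c < e := by simpa using List.pairwise_iff_get.mp hlt' ⟨2, by simp⟩ ⟨3, by simp⟩ (by simp)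
    have ho24 : c < f := by simpa using List.pairwise_iff_get.mp hlt' ⟨2, by simp⟩ ⟨4, by simp⟩ (by simp)
    have ho34 : e < f := by simpa using List.pairwise_iff_get.mp hlt' ⟨3, by simp⟩ ⟨4, by simp⟩ (by simp)
    have hd00 : (decide (a < a)) = false := by simp
    have hd01 : (decide (a < b)) = true := by simp [ho01]
    have hd02 : (decide (a < c)) = true := by simp [ho02]
    have hd03 : (decide (a < e)) = true := by simp [ho03]
    have hd04 : (decide (a < f)) = true := by simp [ho04]
    have hd10 : (decide (b < a)) = false := by simp; omega
    have hd11 : (decide (b < b)) = false := by simp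
    have hd12 : (decide (b < c)) = true := by simp [ho12]
    have hd13 : (decide (b < e)) = true := by simp [ho13]
    have hd14 : (decide (b < f)) = true := by simp [ho14]
    have hd20 : (decide (c < a)) = false := by simp; omega
    have hd21 : (decide (c < b)) = false := by simp; omega
    have hd22 : (decide (c < c)) = false := by simp
    have hd23 : (decide (c < e)) = true := by simp [ho23]
    have hd24 : (decide (c < f)) = true := by simp [ho24]
    have hd30 : (decide (e < a)) = false := by simp; omega
    have hd31 : (decide (e < b)) = false := by simp; omega
    have hd32 : (decide (e < c)) = false := by simp; omega
    have hd33 : (decide (e < e)) = false := by simp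
    have hd34 : (decide (e < f)) = true := by simp [ho34]
    have hd40 : (decide (f < a)) = false := by simp; omega
    have hd41 : (decide (f < b)) = false := by simp; omega
    have hd42 : (decide (f < c)) = false := by simp; omega
    have hd43 : (decide (f < e)) = false := by simp; omega
    have hd44 : (decide (f < f)) = false := by simp
    rw [hcnts]
    constructor
    · first
      | (simp [List.mem_cons]; omega)
      | simp [List.mem_cons]
    · simp only [List.countP_cons, List.countP_nil, hd00, hd01, hd02, hd03, hd04, hd10, hd11, hd12, hd13, hd14, hd20, hd21, hd22, hd23, hd24, hd30, hd31, hd32, hd33, hd34, hd40, hd41, hd42, hd43, hd44]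
      by_cases hca : List.count a L = 2 <;>
        by_cases hcb : List.count b L = 2 <;>
        by_cases hcc : List.count c L = 2 <;>
        by_cases hce : List.count e L = 2 <;>
        by_cases hcf : List.count f L = 2 <;>
        simp [hca, hcb, hcc, hce, hcf] <;>
        omega
  · -- 6 distinct values
    rw [hsl]
    have hlt' := sdist_lt L
    rw [hsl] at hlt'
    have hcnts : cnts L = [(L.count a : Int), (L.count b : Int), (L.count c : Int), (L.count e : Int), (L.count f : Int), (L.count g : Int)] := by simp [cnts, hsl, PySem.List.count_eq]
    have hsum : (L.count a : Int) + (L.count b : Int) + (L.count c : Int) + (L.count e : Int) + (L.count f : Int) + (L.count g : Int) = 6 := by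
      have h := cnts_sum L
      rw [hcnts, h6] at h
      simp at h
      omega
    have h1a : 1 ≤ (L.count a : Int) := count_pos_of_mem_sdist L a (by rw [hsl]; simp)
    have h1b : 1 ≤ (L.count b : Int) := count_pos_of_mem_sdist L b (by rw [hsl]; simp)
    have h1c : 1 ≤ (L.count c : Int) := count_pos_of_mem_sdist L c (by rw [hsl]; simp)
    have h1e : 1 ≤ (L.count e : Int) := count_pos_of_mem_sdist L e (by rw [hsl]; simp)
    have h1f : 1 ≤ (L.count f : Int) := count_pos_of_mem_sdist L f (by rw [hsl]; simp)
    have h1g : 1 ≤ (L.count g : Int) := count_pos_of_mem_sdist L g (by rw [hsl]; simp)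
    have ho01 : a < b := by simpa using List.pairwise_iff_get.mp hlt' ⟨0, by simp⟩ ⟨1, by simp⟩ (by simp)
    have ho02 : a < c := by simpa using List.pairwise_iff_get.mp hlt' ⟨0, by simp⟩ ⟨2, by simp⟩ (by simp)
    have ho03 : a < e := by simpa using List.pairwise_iff_get.mp hlt' ⟨0, by simp⟩ ⟨3, by simp⟩ (by simp)
    have ho04 : a < f := by simpa using List.pairwise_iff_get.mp hlt' ⟨0, by simp⟩ ⟨4, by simp⟩ (by simp)
    have ho05 : a < g := by simpa using List.pairwise_iff_get.mp hlt' ⟨0, by simp⟩ ⟨5, by simp⟩ (by simp)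
    have ho12 : b < c := by simpa using List.pairwise_iff_get.mp hlt' ⟨1, by simp⟩ ⟨2, by simp⟩ (by simp)
    have ho13 : b < e := by simpa using List.pairwise_iff_get.mp hlt' ⟨1, by simp⟩ ⟨3, by simp⟩ (by simp)
    have ho14 : b < f := by simpa using List.pairwise_iff_get.mp hlt' ⟨1, by simp⟩ ⟨4, by simp⟩ (by simp)
    have ho15 : b < g := by simpa using List.pairwise_iff_get.mp hlt' ⟨1, by simp⟩ ⟨5, by simp⟩ (by simp)
    have ho23 : c < e := by simpa using List.pairwise_iff_get.mp hlt' ⟨2, by simp⟩ ⟨3, by simp⟩ (by simp)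
    have ho24 : c < f := by simpa using List.pairwise_iff_get.mp hlt' ⟨2, by simp⟩ ⟨4, by simp⟩ (by simp)
    have ho25 : c < g := by simpa using List.pairwise_iff_get.mp hlt' ⟨2, by simp⟩ ⟨5, by simp⟩ (by simp)
    have ho34 : e < f := by simpa using List.pairwise_iff_get.mp hlt' ⟨3, by simp⟩ ⟨4, by simp⟩ (by simp)
    have ho35 : e < g := by simpa using List.pairwise_iff_get.mp hlt' ⟨3, by simp⟩ ⟨5, by simp⟩ (by simp)
    have ho45 : f < g := by simpa using List.pairwise_iff_get.mp hlt' ⟨4, by simp⟩ ⟨5, by simp⟩ (by simp)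
    have hd00 : (decide (a < a)) = false := by simp
    have hd01 : (decide (a < b)) = true := by simp [ho01]
    have hd02 : (decide (a < c)) = true := by simp [ho02]
    have hd03 : (decide (a < e)) = true := by simp [ho03]
    have hd04 : (decide (a < f)) = true := by simp [ho04]
    have hd05 : (decide (a < g)) = true := by simp [ho05]
    have hd10 : (decide (b < a)) = false := by simp; omega
    have hd11 : (decide (b < b)) = false := by simp
    have hd12 : (decide (b < c)) = true := by simp [ho12]
    have hd13 : (decide (b < e)) = true := by simp [ho13]
    have hd14 : (decide (b < f)) = true := by simp [ho14]
    have hd15 : (decide (b < g)) = true := by simp [ho15]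
    have hd20 : (decide (c < a)) = false := by simp; omega
    have hd21 : (decide (c < b)) = false := by simp; omega
    have hd22 : (decide (c < c)) = false := by simp
    have hd23 : (decide (c < e)) = true := by simp [ho23]
    have hd24 : (decide (c < f)) = true := by simp [ho24]
    have hd25 : (decide (c < g)) = true := by simp [ho25]
    have hd30 : (decide (e < a)) = false := by simp; omega
    have hd31 : (decide (e < b)) = false := by simp; omega
    have hd32 : (decide (e < c)) = false := by simp; omega
    have hd33 : (decide (e < e)) = false := by simp
    have hd34 : (decide (e < f)) = true := by simp [ho34]
    have hd35 : (decide (e < g)) = true := by simp [ho35]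
    have hd40 : (decide (f < a)) = false := by simp; omega
    have hd41 : (decide (f < b)) = false := by simp; omega
    have hd42 : (decide (f < c)) = false := by simp; omega
    have hd43 : (decide (f < e)) = false := by simp; omega
    have hd44 : (decide (f < f)) = false := by simp
    have hd45 : (decide (f < g)) = true := by simp [ho45]
    have hd50 : (decide (g < a)) = false := by simp; omega
    have hd51 : (decide (g < b)) = false := by simp; omega
    have hd52 : (decide (g < c)) = false := by simp; omega
    have hd53 : (decide (g < e)) = false := by simp; omega
    have hd54 : (decide (g < f)) = false := by simp; omega
    have hd55 : (decide (g < g)) = false := by simp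
    rw [hcnts]
    constructor
    · first
      | (simp [List.mem_cons]; omega)
      | simp [List.mem_cons]
    · simp only [List.countP_cons, List.countP_nil, hd00, hd01, hd02, hd03, hd04, hd05, hd10, hd11, hd12, hd13, hd14, hd15, hd20, hd21, hd22, hd23, hd24, hd25, hd30, hd31, hd32, hd33, hd34, hd35, hd40, hd41, hd42, hd43, hd44, hd45, hd50, hd51, hd52, hd53, hd54, hd55]
      by_cases hca : List.count a L = 2 <;>
        by_cases hcb : List.count b L = 2 <;>
        by_cases hcc : List.count c L = 2 <;>
        by_cases hce : List.count e L = 2 <;>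
        by_cases hcf : List.count f L = 2 <;>
        by_cases hcg : List.count g L = 2 <;>
        simp [hca, hcb, hcc, hce, hcf, hcg] <;>
        omega
  · omega


theorem pvCase_cases (L : List Int) :
    pvCase L = none ∨ pvCase L = some "A" ∨ pvCase L = some "B" := by
  simp only [pvCase]
  split_ifs <;> simp

set_option maxHeartbeats 1000000 in
theorem body_bridge (xs ys : List Int) (hx : xs.length = 6) (hy : ys.length = 6) :
    (PySem.Set.contains pvValidCombinations (cnts xs, cnts ys) ||
     PySem.Set.contains pvValidCombinations ((cnts xs).reverse, cnts ys) ||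
     PySem.Set.contains pvValidCombinations (cnts xs, (cnts ys).reverse) ||
     PySem.Set.contains pvValidCombinations ((cnts xs).reverse, (cnts ys).reverse))
      = (match pvCase xs with
         | none => false
         | some c => pvYOk ys c) := by
  have hX := xlem xs hx
  have hY := ylem ys hy
  rcases pvCase_cases xs with hc | hc | hc <;> rw [hc]
  · -- pvCase = none: neither x-pattern holds
    have hnA : ¬ (cnts xs = [2,1,1,1,1] ∨ cnts xs = [1,1,1,1,2]) := by
      rw [hX.1, hc]; simp
    have hnB : ¬ (cnts xs = [1,2,1,1,1] ∨ cnts xs = [1,1,1,2,1]) := by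
      rw [hX.2, hc]; simp
    show _ = false
    rw [Bool.eq_false_iff, ne_eq, patt]
    rintro (⟨h,_⟩|⟨h,_⟩)
    · exact hnA h
    · exact hnB h
  · -- pvCase = some "A"
    have hA : (cnts xs = [2,1,1,1,1] ∨ cnts xs = [1,1,1,1,2]) := hX.1.mpr hc
    have hnB : ¬ (cnts xs = [1,2,1,1,1] ∨ cnts xs = [1,1,1,2,1]) := by
      intro h
      have h2 := hX.2.mp h
      rw [hc] at h2
      simp at h2
    show _ = pvYOk ys "A"
    rw [Bool.eq_iff_iff, patt, ← hY.1]
    constructor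
    · rintro (⟨_, h⟩ | ⟨h, _⟩)
      · exact h
      · exact absurd h hnB
    · intro h
      exact Or.inl ⟨hA, h⟩
  · -- pvCase = some "B"
    have hB : (cnts xs = [1,2,1,1,1] ∨ cnts xs = [1,1,1,2,1]) := hX.2.mpr hc
    have hnA : ¬ (cnts xs = [2,1,1,1,1] ∨ cnts xs = [1,1,1,1,2]) := by
      intro h
      have h2 := hX.1.mp h
      rw [hc] at h2
      simp at h2
    show _ = pvYOk ys "B"
    rw [Bool.eq_iff_iff, patt, ← hY.2]
    constructor
    · rintro (⟨h, _⟩ | ⟨_, h⟩)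
      · exact absurd h hnA
      · exact h
    · intro h
      exact Or.inr ⟨hB, h⟩

theorem pvBody_eq (room_x room_y room_width room_height mergednodes parents : List Int) (p : Int) :
    pvBodyA room_x room_y room_width room_height mergednodes parents p
      = pvBodyB room_x room_y room_width room_height mergednodes p (pvPos parents p) := by
  simp only [pvBodyA, pvBodyB, pvPos, PySem.List.slice?_none_none_neg_one, Option.getD_some]
  exact body_bridge _ _ rfl rfl

theorem pvLoopA_eq_any (room_x room_y room_width room_height mergednodes parents : List Int) (l : List Int) :
    pvLoopA room_x room_y room_width room_height mergednodes parents l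
      = l.any (pvBodyA room_x room_y room_width room_height mergednodes parents) := by
  induction l with
  | nil => rfl
  | cons p rest ih =>
      simp [pvLoopA, ih]

theorem pvLoopB_eq_any (room_x room_y room_width room_height mergednodes : List Int) (l : List (Int × List Int)) :
    pvLoopB room_x room_y room_width room_height mergednodes l
      = l.any (fun pi => pi.2.length == 2 && pvBodyB room_x room_y room_width room_height mergednodes pi.1 pi.2) := by
  induction l with
  | nil => rfl
  | cons pi rest ih =>
      obtain ⟨p, idxs⟩ := pi
      simp only [pvLoopB, List.any_cons, ih]
      by_cases h2 : idxs.length = 2 <;>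
        by_cases hb : pvBodyB room_x room_y room_width room_height mergednodes p idxs = true <;>
          simp [h2, hb]

theorem pvGroups_items (parents : List Int) :
    ((PySem.List.enumerate parents 0).foldl (fun d ip => d.modify ip.2 [] (fun l => l ++ [ip.1])) PySem.Dict.empty).items
      = (PySem.Set.ofList parents).map (fun p => (p, pvPos parents p)) := by
  set l := PySem.List.enumerate parents 0 with hl
  set g := l.foldl (fun d ip => d.modify ip.2 [] (fun l => l ++ [ip.1])) PySem.Dict.empty with hg
  have hnd : g.keys.Nodup := by
    rw [hg]
    exact PySem.Dict.nodup_keys_foldl_modify_key l (fun ip => ip.2) []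
      (fun d ip => (fun l => l ++ [ip.1])) PySem.Dict.empty (by simp)
  have hkeys : g.keys = PySem.Set.ofList parents := by
    rw [hg, PySem.Dict.keys_foldl_modify_key]
    simp [hl, PySem.List.map_snd_enumerate, PySem.Dict.keys_empty, PySem.Set.update,
      PySem.Set.ofList_eq_foldl]
  have hget : ∀ c, g.getD c [] = pvPos parents c := by
    intro c
    rw [hg]
    have hswap : l.foldl (fun d ip => d.modify ip.2 [] (fun l => l ++ [ip.1])) PySem.Dict.empty
        = (l.map (fun ip => (ip.2, ip.1))).foldl
            (fun d q => d.modify q.1 [] (fun l => l ++ [q.2])) PySem.Dict.empty := by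
      rw [List.foldl_map]
    rw [hswap, PySem.Dict.getD_foldl_modify_append]
    simp only [List.filter_map, List.map_map, Function.comp_def]
    simp only [pvPos, hl, PySem.Dict.getD_empty, List.nil_append]
  rw [PySem.Dict.items_eq_map_keys g hnd []]
  rw [hkeys]
  exact List.map_congr_left (fun p _ => by rw [hget p])

theorem pvPos_length (parents : List Int) (p : Int) :
    (pvPos parents p).length = parents.count p := by
  unfold pvPos
  rw [List.length_map, ← List.countP_eq_length_filter]
  have h := PySem.List.map_snd_enumerate (xs := parents) (s := 0)
  calc (PySem.List.enumerate parents 0).countP (fun ip => ip.2 == p)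
      = ((PySem.List.enumerate parents 0).map (fun ip => ip.2)).countP (fun x => x == p) := by
        rw [List.countP_map]; rfl
    _ = parents.count p := by rw [h]; rfl

-- ===== VERDICT (by name: the statement is the Claim_ definition above) =====
theorem filter_F_spec : Claim_equal_filter_F := by
  intro room_x room_y room_width room_height mergednodes parents _hDom _hPre
  unfold Spec_filter_F filter_F filter_F_alt
  rw [pvLoopA_eq_any, pvLoopB_eq_any, pvGroups_items, List.any_map]
  rw [Bool.eq_iff_iff]
  simp only [List.any_eq_true, List.mem_filter, PySem.Set.mem_ofList, Function.comp_def,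
    Bool.and_eq_true, beq_iff_eq]
  constructor
  · rintro ⟨p, ⟨hp, hc⟩, hb⟩
    refine ⟨p, hp, ?_, ?_⟩
    · rw [pvPos_length]
      rw [PySem.List.count_eq] at hc
      exact hc
    · rw [← pvBody_eq]; exact hb
  · rintro ⟨p, hp, hlen, hb⟩
    refine ⟨p, ⟨hp, ?_⟩, ?_⟩
    · rw [pvPos_length] at hlen
      rw [PySem.List.count_eq]
      exact hlen
    · rw [pvBody_eq]; exact hb
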